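-- pv_equiv track=rewrite | github.com/salonimodi/Leetcoding | LIS.py | visitNeighbour
-- ===== SOURCE A (Python) =====
-- def visitNeighbour(node, dag, visited) -> int:
--     if len(dag[node]) == 0:
--         return 0
--     size = 0
--     val = []
--     if node not in visited:
--         size = 1
--         for neighbour in dag[node]:
--             val.append(size)
--             visited.add(node)
--             size += visitNeighbour(neighbour, dag, visited)
--     return size
-- ===== SOURCE B (Python) =====
-- # Iterative worklist re-implementation: explicit stack instead of recursion.
-- # Same return value and the same mutation of `visited` (only counted nodes are added).
-- def visitNeighbour(node, dag, visited) -> int: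
--     stack = [node]
--     count = 0
--     while stack:
--         n = stack.pop()
--         neighbours = dag[n]
--         if neighbours and n not in visited:
--             visited.add(n)
--             count += 1
--             stack.extend(reversed(neighbours))
--     return count
-- ===== Notes on version B (the rewrite author's own statement) =====
-- stated objective: alternative
-- what changed: A's recursive DFS (with a shared visited set threaded through nested calls) is replaced by an iterative explicit-stack worklist loop that pops a node, counts/marks it if it has out-edges and is unvisited, and pushes its neighbours; same count, same mutation of visited, no recursion.
import Mathlib
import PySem

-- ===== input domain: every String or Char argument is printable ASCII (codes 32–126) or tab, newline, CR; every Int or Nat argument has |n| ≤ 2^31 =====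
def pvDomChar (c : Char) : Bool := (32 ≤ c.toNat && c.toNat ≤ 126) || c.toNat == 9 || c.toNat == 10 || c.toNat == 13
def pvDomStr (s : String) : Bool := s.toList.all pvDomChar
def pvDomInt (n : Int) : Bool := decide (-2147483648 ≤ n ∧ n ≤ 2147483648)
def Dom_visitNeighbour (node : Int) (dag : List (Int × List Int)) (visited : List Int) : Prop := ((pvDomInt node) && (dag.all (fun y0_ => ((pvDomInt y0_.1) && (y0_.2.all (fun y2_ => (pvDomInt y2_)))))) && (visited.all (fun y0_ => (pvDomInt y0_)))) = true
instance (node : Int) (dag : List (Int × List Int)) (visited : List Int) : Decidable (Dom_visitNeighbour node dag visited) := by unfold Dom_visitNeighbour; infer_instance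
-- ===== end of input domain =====

-- B replaces A's recursive DFS by an explicit-stack worklist loop (alternative decomposition, same cost);
-- both Pythons mutate `visited` identically (adding exactly the counted nodes) — the theorems are about the return value only.

-- shared helper: dag[n] as a Python dict lookup (getD is exact on Pre_: there every accessed key is present)
def pvAdj (dag : List (Int × List Int)) (n : Int) : List Int := (PySem.Dict.mk dag).getD n []

-- measure helpers and facts needed by port B's termination argument (decreasing_by cites them)
def pvUnvis (dag : List (Int × List Int)) (vis : List Int) : Nat :=
  ((dag.map (·.1)).filter (fun k => !(PySem.Set.contains vis k))).length

def pvEdgeBound (dag : List (Int × List Int)) : Nat := (dag.map (fun p => p.2.length)).sum + 2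

lemma pvGetMk_mem (dag : List (Int × List Int)) (n : Int) (v : List Int)
    (h : (PySem.Dict.mk dag).get? n = some v) : (n, v) ∈ dag := by
  induction dag with
  | nil => simp [PySem.Dict.get?] at h
  | cons p rest ih =>
    obtain ⟨k, w⟩ := p
    rw [PySem.Dict.get?_mk_cons] at h
    by_cases hk : k == n
    · simp [hk] at h
      simp at hk
      simp [hk, h]
    · simp [hk] at h
      exact List.mem_cons_of_mem _ (ih h)

lemma pvAdj_len_le (dag : List (Int × List Int)) (n : Int) :
    (pvAdj dag n).length + 2 ≤ pvEdgeBound dag := by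
  unfold pvAdj pvEdgeBound
  rw [PySem.Dict.getD_eq_get?_getD]
  cases h : (PySem.Dict.mk dag).get? n with
  | none => simp
  | some v =>
    have hm : (n, v) ∈ dag := pvGetMk_mem dag n v h
    have hv : v.length ∈ dag.map (fun p => p.2.length) := List.mem_map.mpr ⟨(n, v), hm, rfl⟩
    have hs : v.length ≤ (dag.map (fun p => p.2.length)).sum :=
      List.single_le_sum (fun x _ => Nat.zero_le x) _ hv
    simp
    omega

lemma pvAdj_ne_nil_mem_keys (dag : List (Int × List Int)) (n : Int)
    (h : (pvAdj dag n).length ≠ 0) : n ∈ dag.map (·.1) := by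
  by_contra hn
  have hc : (PySem.Dict.mk dag).contains n = false := by
    rw [PySem.Dict.contains_eq_decide_mem_keys]
    simpa [PySem.Dict.keys] using hn
  have hnil : pvAdj dag n = [] := PySem.Dict.getD_of_not_contains _ _ hc
  simp [hnil] at h

lemma pvSet_contains_false_iff (vis : List Int) (n : Int) :
    PySem.Set.contains vis n = false ↔ n ∉ vis := by
  simp [PySem.Set.contains]

lemma pvSet_add_not_mem (vis : List Int) (n : Int)
    (h : PySem.Set.contains vis n = false) : PySem.Set.add vis n = vis ++ [n] := by
  have h' : n ∉ vis := (pvSet_contains_false_iff vis n).mp h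
  simp [PySem.Set.add, h']

lemma pvCountP_lt {α : Type} (l : List α) (p q : α → Bool)
    (himp : ∀ x ∈ l, q x = true → p x = true) (a : α) (ha : a ∈ l)
    (hp : p a = true) (hq : q a = false) : l.countP q < l.countP p := by
  induction l with
  | nil => simp at ha
  | cons x xs ih =>
    rw [List.countP_cons, List.countP_cons]
    rcases List.mem_cons.mp ha with h | h
    · subst h
      have hmono : xs.countP q ≤ xs.countP p := by
        apply List.countP_mono_left
        intro y hy hqy
        exact himp y (List.mem_cons_of_mem _ hy) hqy
      have e1 : (if q a then 1 else 0) = 0 := by simp [hq]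
      have e2 : (if p a then 1 else 0) = 1 := by simp [hp]
      rw [e1, e2]
      omega
    · have hxs := ih (fun y hy hqy => himp y (List.mem_cons_of_mem _ hy) hqy) h
      have hhead : (if q x then 1 else 0) ≤ (if p x then 1 else 0) := by
        by_cases hqx : q x = true
        · simp [hqx, himp x List.mem_cons_self hqx]
        · have hqx' : q x = false := by
            cases hb : q x
            · rfl
            · exact absurd hb hqx
          simp [hqx']
      omega

lemma pvUnvis_add_lt (dag : List (Int × List Int)) (vis : List Int) (n : Int)
    (hk : n ∈ dag.map (·.1)) (hn : PySem.Set.contains vis n = false) :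
    pvUnvis dag (PySem.Set.add vis n) < pvUnvis dag vis := by
  unfold pvUnvis
  rw [pvSet_add_not_mem vis n hn]
  rw [← List.countP_eq_length_filter, ← List.countP_eq_length_filter]
  refine pvCountP_lt _ _ _ ?_ n hk ?_ ?_
  · intro x _ hqx
    simp only [Bool.not_eq_true'] at hqx ⊢
    rw [pvSet_contains_false_iff] at hqx ⊢
    intro hmem
    exact hqx (List.mem_append.mpr (Or.inl hmem))
  · simp [(pvSet_contains_false_iff vis n).mp hn]
  · simp [PySem.Set.contains]

-- ===== PORT A =====
-- Literal transliteration of A's recursion; Python mutates `visited` in place, so the helper threads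
-- it as explicit state and returns (size, visited'). The Python recursion nests at most
-- (number of dag keys) + 1 calls deep, so fuel dag.length + 1 always suffices (see visitA_total
-- below); the .getD default is never reached on inputs satisfying Pre_.
mutual
def visitAF (fuel : Nat) (node : Int) (dag : List (Int × List Int)) (vis : List Int) :
    Option (Int × List Int) :=
  match fuel with
  | 0 => none
  | f + 1 =>
    if (pvAdj dag node).length = 0 then some (0, vis)          -- if len(dag[node]) == 0: return 0
    else if PySem.Set.contains vis node then some (0, vis)     -- `if node not in visited` fails: size stays 0
    else visitALoopF f node dag (pvAdj dag node) 1 vis         -- size = 1; for neighbour in dag[node]: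
  termination_by (fuel, 0)

def visitALoopF (f : Nat) (node : Int) (dag : List (Int × List Int)) (ns : List Int)
    (size : Int) (vis : List Int) : Option (Int × List Int) :=
  match ns with
  | [] => some (size, vis)
  | n :: rest =>
    match visitAF f n dag (PySem.Set.add vis node) with        -- visited.add(node); size += visitNeighbour(...)
    | none => none
    | some (d, vis2) => visitALoopF f node dag rest (size + d) vis2
  termination_by (f, ns.length + 1)
end

def visitNeighbour (node : Int) (dag : List (Int × List Int)) (visited : List Int) : Int :=
  ((visitAF (dag.length + 1) node dag visited).getD (0, visited)).1

-- ===== PORT B =====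
-- Transliteration of Source B's worklist loop. The Python stack is stored top-first (head = top of stack):
-- `n = stack.pop()` then `stack.extend(reversed(neighbours))` is exactly `n :: rest ↦ ns ++ rest`.
def loopB (dag : List (Int × List Int)) (stack vis : List Int) (cnt : Int) : Int :=
  match stack with
  | [] => cnt
  | n :: rest =>
    if h : (pvAdj dag n).length ≠ 0 ∧ PySem.Set.contains vis n = false then  -- if neighbours and n not in visited
      loopB dag (pvAdj dag n ++ rest) (PySem.Set.add vis n) (cnt + 1)
    else loopB dag rest vis cnt
termination_by pvUnvis dag vis * pvEdgeBound dag + stack.length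
decreasing_by
  · have h1 := pvUnvis_add_lt dag vis n (pvAdj_ne_nil_mem_keys dag n h.1) h.2
    have h2 := pvAdj_len_le dag n
    have h3 : pvUnvis dag (PySem.Set.add vis n) * pvEdgeBound dag + pvEdgeBound dag
        ≤ pvUnvis dag vis * pvEdgeBound dag := by
      have hle : pvUnvis dag (PySem.Set.add vis n) + 1 ≤ pvUnvis dag vis := h1
      calc pvUnvis dag (PySem.Set.add vis n) * pvEdgeBound dag + pvEdgeBound dag
          = (pvUnvis dag (PySem.Set.add vis n) + 1) * pvEdgeBound dag := by ring
        _ ≤ pvUnvis dag vis * pvEdgeBound dag := Nat.mul_le_mul_right _ hle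
    simp only [List.length_append, List.length_cons]
    omega
  · simp only [List.length_cons]
    omega

def visitNeighbour_alt (node : Int) (dag : List (Int × List Int)) (visited : List Int) : Int :=
  loopB dag [node] visited 0

-- ===== PRECONDITION & SPEC =====
-- Static reachability of the input graph (used only by Pre_, not by either port): the set of nodes
-- reachable from `node` along edges of "expandable" nodes — nodes that are dag keys with non-empty
-- adjacency and are not in the initial `visited` set. It is computed as a monotone closure, iterated
-- dag.length + 2 times, which always reaches the fixpoint (each productive iteration expands a new key).
def pvReachStep (dag : List (Int × List Int)) (visited : List Int) (R : List Int) : List Int :=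
  R.foldl (fun acc n =>
    if n ∉ visited ∧ pvAdj dag n ≠ [] then (pvAdj dag n).foldl PySem.Set.add acc else acc) R

def pvReachIter (dag : List (Int × List Int)) (visited : List Int) : Nat → List Int → List Int
  | 0, R => R
  | k + 1, R => pvReachIter dag visited k (pvReachStep dag visited R)

def pvReach (node : Int) (dag : List (Int × List Int)) (visited : List Int) : List Int :=
  pvReachIter dag visited (dag.length + 2) [node]

-- Pre_ excludes exactly the inputs on which Python A raises KeyError: every node reachable from
-- `node` through unvisited non-empty-adjacency keys must itself be a dag key (A and B access dag[]
-- on exactly these nodes, so they raise on exactly the same inputs).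
def Pre_visitNeighbour (node : Int) (dag : List (Int × List Int)) (visited : List Int) : Prop :=
  ∀ n ∈ pvReach node dag visited, n ∈ dag.map (·.1)
instance (node : Int) (dag : List (Int × List Int)) (visited : List Int) : Decidable (Pre_visitNeighbour node dag visited) := by unfold Pre_visitNeighbour; infer_instance

def pvWitness_visitNeighbour : Int × (List (Int × List Int)) × List Int :=
  (0, [(0, [1]), (1, [])], [])

def Spec_visitNeighbour (node : Int) (dag : List (Int × List Int)) (visited : List Int) (out : Int) : Prop := out = visitNeighbour_alt node dag visited
instance (node : Int) (dag : List (Int × List Int)) (visited : List Int) (out : Int) : Decidable (Spec_visitNeighbour node dag visited out) := by unfold Spec_visitNeighbour; infer_instance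

-- ===== CLAIM (what is proved, stated in full; the proofs are below) =====
def Claim_equal_visitNeighbour : Prop := ∀ (node : Int) (dag : List (Int × List Int)) (visited : List Int), Dom_visitNeighbour node dag visited → Pre_visitNeighbour node dag visited → Spec_visitNeighbour node dag visited (visitNeighbour node dag visited)

-- ===== LEMMAS AND PROOFS =====

lemma pvSet_contains_true_iff (vis : List Int) (n : Int) :
    PySem.Set.contains vis n = true ↔ n ∈ vis := by
  simp [PySem.Set.contains]

lemma pvSet_add_mem (vis : List Int) (n : Int)
    (h : n ∈ vis) : PySem.Set.add vis n = vis := by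
  simp [PySem.Set.add, h]

lemma pvUnvis_mono (dag : List (Int × List Int)) (vis v' : List Int)
    (h : vis ⊆ v') : pvUnvis dag v' ≤ pvUnvis dag vis := by
  unfold pvUnvis
  rw [← List.countP_eq_length_filter, ← List.countP_eq_length_filter]
  apply List.countP_mono_left
  intro k _ hk
  simp only [Bool.not_eq_true'] at hk ⊢
  rw [pvSet_contains_false_iff] at hk ⊢
  exact fun hm => hk (h hm)

-- unfolding equations for the two ports
lemma visitAF_zero (node : Int) (dag : List (Int × List Int)) (vis : List Int) :
    visitAF 0 node dag vis = none := by
  rw [visitAF.eq_def]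

lemma visitAF_succ (f : Nat) (node : Int) (dag : List (Int × List Int)) (vis : List Int) :
    visitAF (f + 1) node dag vis =
      if (pvAdj dag node).length = 0 then some (0, vis)
      else if PySem.Set.contains vis node then some (0, vis)
      else visitALoopF f node dag (pvAdj dag node) 1 vis := by
  rw [visitAF.eq_def]

lemma visitALoopF_nil (f : Nat) (node : Int) (dag : List (Int × List Int)) (size : Int)
    (vis : List Int) : visitALoopF f node dag [] size vis = some (size, vis) := by
  rw [visitALoopF.eq_def]

lemma visitALoopF_cons (f : Nat) (node : Int) (dag : List (Int × List Int)) (n : Int)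
    (rest : List Int) (size : Int) (vis : List Int) :
    visitALoopF f node dag (n :: rest) size vis =
      match visitAF f n dag (PySem.Set.add vis node) with
      | none => none
      | some (d, vis2) => visitALoopF f node dag rest (size + d) vis2 := by
  rw [visitALoopF.eq_def]

lemma loopB_nil (dag : List (Int × List Int)) (vis : List Int) (cnt : Int) :
    loopB dag [] vis cnt = cnt := by
  rw [loopB.eq_def]

lemma loopB_cons_true (dag : List (Int × List Int)) (n : Int) (rest vis : List Int) (cnt : Int)
    (h1 : (pvAdj dag n).length ≠ 0) (h2 : PySem.Set.contains vis n = false) :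
    loopB dag (n :: rest) vis cnt =
      loopB dag (pvAdj dag n ++ rest) (PySem.Set.add vis n) (cnt + 1) := by
  rw [loopB.eq_def]
  simp [h1, (pvSet_contains_false_iff vis n).mp h2]

lemma loopB_cons_false (dag : List (Int × List Int)) (n : Int) (rest vis : List Int) (cnt : Int)
    (h : ¬((pvAdj dag n).length ≠ 0 ∧ PySem.Set.contains vis n = false)) :
    loopB dag (n :: rest) vis cnt = loopB dag rest vis cnt := by
  rw [loopB.eq_def]
  simp only []
  rw [dif_neg h]

-- the first loop iteration's visited.add(node) can be pulled out in front of the loop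
lemma visitALoopF_shift (f : Nat) (node : Int) (dag : List (Int × List Int)) (n : Int)
    (rest : List Int) (size : Int) (vis : List Int) :
    visitALoopF f node dag (n :: rest) size vis =
      visitALoopF f node dag (n :: rest) size (PySem.Set.add vis node) := by
  rw [visitALoopF_cons, visitALoopF_cons]
  rw [pvSet_add_mem (PySem.Set.add vis node) node
    ((PySem.Set.mem_add vis node node).mpr (Or.inr rfl))]

-- A's recursion only ever grows the visited set
lemma visitA_subset (dag : List (Int × List Int)) : ∀ f : Nat,
    (∀ node vis d v', visitAF f node dag vis = some (d, v') → vis ⊆ v') ∧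
    (∀ node ns size vis sz v', visitALoopF f node dag ns size vis = some (sz, v') → vis ⊆ v') := by
  intro f
  induction f with
  | zero =>
    constructor
    · intro node vis d v' h
      rw [visitAF_zero] at h
      cases h
    · intro node ns
      induction ns with
      | nil =>
        intro size vis sz v' h
        rw [visitALoopF_nil] at h
        simp at h
        rw [← h.2]
        exact fun x hx => hx
      | cons n rest ihns =>
        intro size vis sz v' h
        rw [visitALoopF_cons, visitAF_zero] at h
        cases h
  | succ f ih =>
    obtain ⟨ihA, ihL⟩ := ih
    have hA : ∀ node vis d v', visitAF (f + 1) node dag vis = some (d, v') → vis ⊆ v' := by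
      intro node vis d v' h
      rw [visitAF_succ] at h
      split_ifs at h with h1 h2
      · simp at h; rw [← h.2]; exact fun x hx => hx
      · simp at h; rw [← h.2]; exact fun x hx => hx
      · exact ihL node (pvAdj dag node) 1 vis d v' h
    refine ⟨hA, ?_⟩
    intro node ns
    induction ns with
    | nil =>
      intro size vis sz v' h
      rw [visitALoopF_nil] at h
      simp at h
      rw [← h.2]
      exact fun x hx => hx
    | cons n rest ihns =>
      intro size vis sz v' h
      rw [visitALoopF_cons] at h
      cases hAF : visitAF (f + 1) n dag (PySem.Set.add vis node) with
      | none => rw [hAF] at h; cases h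
      | some p =>
        obtain ⟨d, vis2⟩ := p
        rw [hAF] at h
        have hs1 : vis ⊆ PySem.Set.add vis node :=
          fun x hx => (PySem.Set.mem_add vis node x).mpr (Or.inl hx)
        have hs2 : PySem.Set.add vis node ⊆ vis2 := hA _ _ _ _ hAF
        have hs3 : vis2 ⊆ v' := ihns (size + d) vis2 sz v' h
        exact fun x hx => hs3 (hs2 (hs1 hx))

-- with fuel above the number of still-unvisited keys, A's recursion returns
lemma visitA_total (dag : List (Int × List Int)) : ∀ f : Nat,
    (∀ node vis, pvUnvis dag vis < f → ∃ d v', visitAF f node dag vis = some (d, v')) ∧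
    (∀ node ns size vis, pvUnvis dag (PySem.Set.add vis node) < f →
      ∃ sz v', visitALoopF f node dag ns size vis = some (sz, v')) := by
  intro f
  induction f with
  | zero =>
    constructor
    · intro node vis h; omega
    · intro node ns size vis h; omega
  | succ f ih =>
    have hA : ∀ node vis, pvUnvis dag vis < f + 1 →
        ∃ d v', visitAF (f + 1) node dag vis = some (d, v') := by
      intro node vis hU
      rw [visitAF_succ]
      by_cases h1 : (pvAdj dag node).length = 0
      · exact ⟨0, vis, by simp [h1]⟩
      by_cases h2 : PySem.Set.contains vis node = true
      · exact ⟨0, vis, by simp [h1, (pvSet_contains_true_iff vis node).mp h2]⟩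
      · have h2' : PySem.Set.contains vis node = false := by
          cases hb : PySem.Set.contains vis node
          · rfl
          · exact absurd hb h2
        have hkey := pvAdj_ne_nil_mem_keys dag node h1
        have hlt := pvUnvis_add_lt dag vis node hkey h2'
        have hUf : pvUnvis dag (PySem.Set.add vis node) < f := by omega
        obtain ⟨sz, v', hL⟩ := ih.2 node (pvAdj dag node) 1 vis hUf
        exact ⟨sz, v', by simp [h1, (pvSet_contains_false_iff vis node).mp h2', hL]⟩
    refine ⟨hA, ?_⟩
    intro node ns
    induction ns with
    | nil =>
      intro size vis _
      exact ⟨size, vis, visitALoopF_nil (f + 1) node dag size vis⟩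
    | cons n rest ihns =>
      intro size vis hU
      obtain ⟨d, vis2, hAF⟩ := hA n (PySem.Set.add vis node) hU
      have hsub : PySem.Set.add vis node ⊆ vis2 := (visitA_subset dag (f + 1)).1 _ _ _ _ hAF
      have hnode2 : node ∈ vis2 := hsub ((PySem.Set.mem_add vis node node).mpr (Or.inr rfl))
      have habs : PySem.Set.add vis2 node = vis2 := pvSet_add_mem _ _ hnode2
      have hU2 : pvUnvis dag (PySem.Set.add vis2 node) < f + 1 := by
        rw [habs]
        exact lt_of_le_of_lt (pvUnvis_mono dag _ _ hsub) hU
      obtain ⟨sz, v', hL⟩ := ihns (size + d) vis2 hU2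
      refine ⟨sz, v', ?_⟩
      rw [visitALoopF_cons, hAF]
      exact hL

-- the worklist loop simulates A's recursion step for step
lemma visitA_bisim (dag : List (Int × List Int)) : ∀ f : Nat,
    (∀ node vis d v', visitAF f node dag vis = some (d, v') →
      ∀ rest cnt, loopB dag (node :: rest) vis cnt = loopB dag rest v' (cnt + d)) ∧
    (∀ node ns size vis sz v', node ∈ vis → visitALoopF f node dag ns size vis = some (sz, v') →
      ∀ rest cnt, loopB dag (ns ++ rest) vis cnt = loopB dag rest v' (cnt + sz - size)) := by
  intro f
  induction f with
  | zero =>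
    constructor
    · intro node vis d v' h
      rw [visitAF_zero] at h
      cases h
    · intro node ns
      induction ns with
      | nil =>
        intro size vis sz v' _ h rest cnt
        rw [visitALoopF_nil] at h
        simp at h
        rw [← h.1, ← h.2, List.nil_append]
        have : cnt + size - size = cnt := by ring
        rw [this]
      | cons n rest' ihns =>
        intro size vis sz v' _ h rest cnt
        rw [visitALoopF_cons, visitAF_zero] at h
        cases h
  | succ f ih =>
    have hA : ∀ node vis d v', visitAF (f + 1) node dag vis = some (d, v') →
        ∀ rest cnt, loopB dag (node :: rest) vis cnt = loopB dag rest v' (cnt + d) := by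
      intro node vis d v' h rest cnt
      rw [visitAF_succ] at h
      split_ifs at h with h1 h2
      · simp at h
        rw [← h.1, ← h.2, loopB_cons_false dag node rest vis cnt (by simp [h1])]
        simp
      · simp at h
        rw [← h.1, ← h.2,
          loopB_cons_false dag node rest vis cnt
            (by simp [(pvSet_contains_true_iff vis node).mp h2])]
        simp
      · have h2' : PySem.Set.contains vis node = false := by
          cases hb : PySem.Set.contains vis node
          · rfl
          · exact absurd hb h2
        obtain ⟨m, ms, hns⟩ : ∃ m ms, pvAdj dag node = m :: ms := by
          cases hc : pvAdj dag node with
          | nil => rw [hc] at h1; simp at h1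
          | cons m ms => exact ⟨m, ms, rfl⟩
        rw [hns, visitALoopF_shift] at h
        have hmem : node ∈ PySem.Set.add vis node :=
          (PySem.Set.mem_add vis node node).mpr (Or.inr rfl)
        have hloop := ih.2 node (m :: ms) 1 (PySem.Set.add vis node) d v' hmem h
          rest (cnt + 1)
        rw [loopB_cons_true dag node rest vis cnt h1 h2', hns, hloop]
        have : cnt + 1 + d - 1 = cnt + d := by ring
        rw [this]
    refine ⟨hA, ?_⟩
    intro node ns
    induction ns with
    | nil =>
      intro size vis sz v' _ h rest cnt
      rw [visitALoopF_nil] at h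
      simp at h
      rw [← h.1, ← h.2, List.nil_append]
      have : cnt + size - size = cnt := by ring
      rw [this]
    | cons n rest' ihns =>
      intro size vis sz v' hmem h rest cnt
      rw [visitALoopF_cons, pvSet_add_mem vis node hmem] at h
      cases hAF : visitAF (f + 1) n dag vis with
      | none => rw [hAF] at h; cases h
      | some p =>
        obtain ⟨d1, vis2⟩ := p
        rw [hAF] at h
        have hstep := hA n vis d1 vis2 hAF (rest' ++ rest) cnt
        have hmem2 : node ∈ vis2 := (visitA_subset dag (f + 1)).1 _ _ _ _ hAF hmem
        have hrec := ihns (size + d1) vis2 sz v' hmem2 h rest (cnt + d1)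
        rw [List.cons_append, hstep, hrec]
        have : cnt + d1 + sz - (size + d1) = cnt + sz - size := by ring
        rw [this]

-- ===== VERDICT (by name: the statement is the Claim_ definition above) =====
theorem visitNeighbour_spec : Claim_equal_visitNeighbour := by
  intro node dag vis _ _
  unfold Spec_visitNeighbour visitNeighbour visitNeighbour_alt
  have hU : pvUnvis dag vis < dag.length + 1 := by
    have hle : pvUnvis dag vis ≤ (dag.map (·.1)).length := by
      unfold pvUnvis
      exact List.length_filter_le _ _
    simp at hle
    omega
  obtain ⟨d, v', hAF⟩ := (visitA_total dag (dag.length + 1)).1 node vis hU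
  have hbi := (visitA_bisim dag (dag.length + 1)).1 node vis d v' hAF [] 0
  rw [hAF]
  simp only [Option.getD_some]
  rw [hbi, loopB_nil]
  omega
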